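-- pv_equiv track=rewrite | github.com/BartoszBiernacki/ABM | my_models/mesa_grid_star/text_processing.py | group_tuples_by_start
-- ===== SOURCE A (Python) =====
-- import itertools
--
-- def group_tuples_by_start(list_of_tuples, start_length):
--     result = {}
--     tuples_starts = [[item for i, item in enumerate(tup) if i < start_length] for tup in list_of_tuples]
--     tuples_starts.sort()
--     unique_tuples_starts = list(tuples_starts for tuples_starts, _ in itertools.groupby(tuples_starts))
--
--     for unique_tuple_start in unique_tuples_starts:
--         tuples_grouped_by_start = []
--         for tup in list_of_tuples:
--             tuple_start = tup[:start_length]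
--             if list(tuple_start) == unique_tuple_start:
--                 tuples_grouped_by_start.append(tup)
--         result[tuple(unique_tuple_start)] = tuples_grouped_by_start
--     return result
-- ===== SOURCE B (Python) =====
-- def group_tuples_by_start(list_of_tuples, start_length):
--     groups = {}
--     for tup in list_of_tuples:
--         key = tuple(tup[:start_length])
--         if key in groups:
--             groups[key].append(tup)
--         else:
--             groups[key] = [tup]
--     return dict(sorted(groups.items(), key=lambda kv: kv[0]))
-- ===== Notes on version B (the rewrite author's own statement) =====
-- stated objective: faster
-- what changed: Replace the scan-per-unique-prefix (one full pass over the list for every distinct prefix) by a single pass that appends each tuple into a dict keyed by its prefix, then sorts the dict items by key.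
-- outside the precondition, e.g. on group_tuples_by_start([(1, 2)], -1): A returns {(): []}, B returns {(1,): [[1, 2]]}
import Mathlib
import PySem

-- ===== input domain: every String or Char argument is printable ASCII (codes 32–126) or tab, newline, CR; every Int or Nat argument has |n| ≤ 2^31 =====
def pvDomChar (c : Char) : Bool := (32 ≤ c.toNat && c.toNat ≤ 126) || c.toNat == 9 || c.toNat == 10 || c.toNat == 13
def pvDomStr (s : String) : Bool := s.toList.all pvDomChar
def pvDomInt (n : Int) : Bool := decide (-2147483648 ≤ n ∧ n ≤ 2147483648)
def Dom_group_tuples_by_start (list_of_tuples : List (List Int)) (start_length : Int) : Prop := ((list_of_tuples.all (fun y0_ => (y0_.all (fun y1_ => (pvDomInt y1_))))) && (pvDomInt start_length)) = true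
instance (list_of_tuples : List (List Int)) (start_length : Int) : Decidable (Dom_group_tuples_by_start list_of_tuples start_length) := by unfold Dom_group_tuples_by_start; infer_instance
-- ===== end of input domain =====

-- B replaces A's per-unique-prefix rescans of the whole list by one grouping pass into a
-- dict keyed by the prefix followed by a sort of the items by key (objective: faster).

-- ===== PORT A =====
-- itertools.groupby-based dedup of ADJACENT equal elements (what
-- 'list(ts for ts, _ in itertools.groupby(ts))' computes on the sorted list)
def pvDedupAdj : List (List Int) → List (List Int)
  | [] => []
  | [x] => [x]
  | x :: y :: rest => if x = y then pvDedupAdj (y :: rest) else x :: pvDedupAdj (y :: rest)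

def group_tuples_by_start (list_of_tuples : List (List Int)) (start_length : Int) : List (List Int × List (List Int)) :=
  let tuples_starts := list_of_tuples.map (fun tup =>
    ((PySem.List.enumerate tup).filter (fun p => decide (p.1 < start_length))).map (fun p => p.2))
  let tuples_starts := PySem.List.sorted tuples_starts (fun x => x) false
  let unique_tuples_starts := pvDedupAdj tuples_starts
  (unique_tuples_starts.foldl (fun result unique_tuple_start =>
      result.insert unique_tuple_start (list_of_tuples.filter (fun tup =>
        PySem.List.slice tup none (some start_length) == unique_tuple_start)))
    PySem.Dict.empty).items

-- ===== PORT B =====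
def group_tuples_by_start_alt (list_of_tuples : List (List Int)) (start_length : Int) : List (List Int × List (List Int)) :=
  let groups := list_of_tuples.foldl (fun d tup =>
      d.modify (PySem.List.slice tup none (some start_length)) [] (fun v => v ++ [tup]))
    PySem.Dict.empty
  PySem.List.sorted groups.items (fun kv => kv.1) false

-- ===== PRECONDITION & SPEC =====
-- Pre_ restricts start_length to the natural domain of a prefix length (0 ≤ start_length);
-- for a negative start_length A still returns, but its value is an accident of the
-- implementation (the unique prefixes are built with 'i < start_length', hence always empty,
-- while the membership test slices tup[:start_length], so only short tuples are kept).
def Pre_group_tuples_by_start (list_of_tuples : List (List Int)) (start_length : Int) : Prop :=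
  0 ≤ start_length
instance (list_of_tuples : List (List Int)) (start_length : Int) : Decidable (Pre_group_tuples_by_start list_of_tuples start_length) := by unfold Pre_group_tuples_by_start; infer_instance

def pvWitness_group_tuples_by_start : List (List Int) × Int := ([[1, 2], [1, 3], [2]], 1)

def Spec_group_tuples_by_start (list_of_tuples : List (List Int)) (start_length : Int) (out : List (List Int × List (List Int))) : Prop := out = group_tuples_by_start_alt list_of_tuples start_length
instance (list_of_tuples : List (List Int)) (start_length : Int) (out : List (List Int × List (List Int))) : Decidable (Spec_group_tuples_by_start list_of_tuples start_length out) := by unfold Spec_group_tuples_by_start; infer_instance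

-- ===== CLAIM (what is proved, stated in full; the proofs are below) =====
def Claim_equal_group_tuples_by_start : Prop := ∀ (list_of_tuples : List (List Int)) (start_length : Int), Dom_group_tuples_by_start list_of_tuples start_length → Pre_group_tuples_by_start list_of_tuples start_length → Spec_group_tuples_by_start list_of_tuples start_length (group_tuples_by_start list_of_tuples start_length)

-- ===== LEMMAS AND PROOFS =====

-- A's enumerate-based prefix is take, for a nonnegative bound (generalized over the start index)
lemma enum_filter_take (t : List Int) : ∀ (s n : Int),
    ((PySem.List.enumerate t s).filter (fun p => decide (p.1 < n))).map (fun p => p.2)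
      = t.take (n - s).toNat := by
  induction t with
  | nil => intro s n; simp [PySem.List.enumerate_nil]
  | cons x xs ih =>
    intro s n
    rw [PySem.List.enumerate_cons]
    by_cases h : s < n
    · have h1 : (n - s).toNat = (n - (s + 1)).toNat + 1 := by omega
      simp [h, ih (s + 1) n, h1]
    · have h1 : (n - s).toNat = 0 := by omega
      have h2 : (n - (s + 1)).toNat = 0 := by omega
      simp [h, ih (s + 1) n, h1, h2]

lemma mem_pvDedupAdj : ∀ (l : List (List Int)) (x : List Int), x ∈ pvDedupAdj l ↔ x ∈ l := by
  intro l
  induction l using pvDedupAdj.induct with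
  | case1 => simp [pvDedupAdj]
  | case2 x => simp [pvDedupAdj]
  | case3 y rest ih =>
    intro z; simp only [pvDedupAdj, if_true]
    rw [ih]
    simp
  | case4 x y rest hne ih =>
    intro z; simp only [pvDedupAdj, if_neg hne]
    simp [ih]

lemma pvDedupAdj_pairwise_lt : ∀ (l : List (List Int)),
    l.Pairwise (· ≤ ·) → (pvDedupAdj l).Pairwise (· < ·) := by
  intro l
  induction l using pvDedupAdj.induct with
  | case1 => intro _; simp [pvDedupAdj]
  | case2 x => intro _; simp [pvDedupAdj]
  | case3 y rest ih =>
    intro h; rw [pvDedupAdj, if_pos rfl]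
    exact ih (List.Pairwise.sublist (List.sublist_cons_self _ _) h)
  | case4 x y rest hne ih =>
    intro h
    have htail : (y :: rest).Pairwise (· ≤ ·) :=
      List.Pairwise.sublist (List.sublist_cons_self _ _) h
    rw [pvDedupAdj, if_neg hne]
    refine List.pairwise_cons.mpr ⟨?_, ih htail⟩
    intro z hz
    have hzmem : z ∈ y :: rest := (mem_pvDedupAdj _ z).mp hz
    have hxy : x < y := lt_of_le_of_ne (List.rel_of_pairwise_cons h (List.mem_cons_self)) hne
    rcases List.mem_cons.mp hzmem with rfl | hzr
    · exact hxy
    · exact lt_of_lt_of_le hxy (List.rel_of_pairwise_cons htail hzr)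

-- the two DecidableLT instances Lean elaborates for 'sorted' on List Int keys are the same order
lemma pvSortedInst {α : Type} (xs : List α) (key : α → List Int) (rev : Bool) :
    @PySem.List.sorted α (List Int) List.instLT (fun a b => a.decidableLT b) xs key rev
      = @PySem.List.sorted α (List Int) List.instLinearOrder.toLT LinearOrder.toDecidableLT xs key rev := by
  congr 1

-- the grouping table both programs compute, as a function of the prefix list
lemma groups_items_eq (L : List (List Int)) (n : Int) :
    (L.foldl (fun d tup =>
        d.modify (PySem.List.slice tup none (some n)) [] (fun v => v ++ [tup]))
      PySem.Dict.empty).items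
    = (PySem.Set.ofList (L.map (fun tup => PySem.List.slice tup none (some n)))).map
        (fun u => (u, L.filter (fun tup => PySem.List.slice tup none (some n) == u))) := by
  set pf : List Int → List Int := fun tup => PySem.List.slice tup none (some n) with hpf
  set d := L.foldl (fun d tup => d.modify (pf tup) [] (fun v => v ++ [tup])) PySem.Dict.empty with hd
  have hkeys : d.keys = PySem.Set.ofList (L.map pf) := by
    rw [hd, PySem.Dict.keys_foldl_modify_key L pf [] (fun _ tup v => v ++ [tup])]
    simp [PySem.Set.update_nil_left]
  have hnd : d.keys.Nodup := by rw [hkeys]; exact PySem.Set.nodup_ofList _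
  have hgetD : ∀ u, d.getD u [] = L.filter (fun tup => pf tup == u) := by
    intro u
    have hfold : d = (L.map (fun tup => (pf tup, tup))).foldl
        (fun d p => d.modify p.1 [] (fun v => v ++ [p.2])) PySem.Dict.empty := by
      rw [hd, List.foldl_map]
    rw [hfold, PySem.Dict.getD_foldl_modify_append]
    simp [List.filter_map, Function.comp_def]
  rw [PySem.Dict.items_eq_map_keys d hnd [], hkeys]
  exact List.map_congr_left (fun u _ => by rw [hgetD u])

theorem group_tuples_by_start_eq (L : List (List Int)) (n : Int) (hn : 0 ≤ n) :
    group_tuples_by_start L n = group_tuples_by_start_alt L n := by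
  unfold group_tuples_by_start group_tuples_by_start_alt
  simp only
  have hpref : ∀ tup : List Int,
      ((PySem.List.enumerate tup).filter (fun p => decide (p.1 < n))).map (fun p => p.2)
        = PySem.List.slice tup none (some n) := by
    intro tup
    rw [enum_filter_take tup 0 n, PySem.List.slice_to tup hn]
    norm_num
  have hmapA : (L.map (fun tup =>
      ((PySem.List.enumerate tup).filter (fun p => decide (p.1 < n))).map (fun p => p.2)))
      = L.map (fun tup => PySem.List.slice tup none (some n)) :=
    List.map_congr_left (fun tup _ => hpref tup)
  rw [hmapA, groups_items_eq L n]
  set s := PySem.List.sorted (L.map (fun tup => PySem.List.slice tup none (some n)))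
      (fun x : List Int => x) false with hs
  have hle : s.Pairwise (fun a b => a ≤ b) := by
    rw [hs, pvSortedInst]
    exact PySem.List.sorted_pairwise (L.map (fun tup => PySem.List.slice tup none (some n)))
      (fun x : List Int => x)
  have huq_lt : (pvDedupAdj s).Pairwise (· < ·) := pvDedupAdj_pairwise_lt _ hle
  have huq_nd : (pvDedupAdj s).Nodup := huq_lt.imp (fun h => ne_of_lt h)
  have hA : (List.foldl (fun result u =>
        result.insert u (L.filter (fun tup => PySem.List.slice tup none (some n) == u)))
        PySem.Dict.empty (pvDedupAdj s)).items
      = (pvDedupAdj s).map (fun u =>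
          (u, L.filter (fun tup => PySem.List.slice tup none (some n) == u))) := by
    simpa using PySem.Dict.items_foldl_insert_fresh (pvDedupAdj s) (fun u => u)
      (fun u => L.filter (fun tup => PySem.List.slice tup none (some n) == u)) PySem.Dict.empty
      (fun a _ => PySem.Dict.contains_empty a) (by simpa using huq_nd)
  rw [hA, pvSortedInst]
  refine (PySem.List.sorted_eq_of_perm_of_pairwise_lt (κ := List Int) _ _ _ ?_ ?_).symm
  · refine List.Perm.map _ ?_
    refine (List.perm_ext_iff_of_nodup huq_nd (PySem.Set.nodup_ofList _)).mpr ?_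
    intro u
    rw [mem_pvDedupAdj, hs, PySem.List.mem_sorted, PySem.Set.mem_ofList]
  · rw [List.pairwise_map]
    exact huq_lt.imp (fun h => by simpa using h)

-- ===== VERDICT (by name: the statement is the Claim_ definition above) =====
theorem group_tuples_by_start_spec : Claim_equal_group_tuples_by_start := by
  intro L n _ hpre
  unfold Spec_group_tuples_by_start
  exact group_tuples_by_start_eq L n hpre
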